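-- pv_equiv track=rewrite | github.com/College-Track/fy21_hs_survey | src/helpers.py | generate_question_list
-- ===== SOURCE A (Python) =====
-- def generate_question_list(columns, section_name, subsection_name):
--     question_sections = {}
--     question_subsections = {}
--     for index, value in enumerate(columns):
--         if section_name in value:
--             section = value
--             i = index + 1
--             while i < len(columns) and section_name not in columns[i]:
--                 if subsection_name in columns[i]:
--                     subsection = columns[i]
--                     y = i + 1
--                     while y < len(columns) and subsection_name not in columns[y]:
--                         if section_name in columns[y]:
--                             break
--                         else:
--                             question_subsections[columns[y]] = subsection
--                             y += 1
--                 else: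
--                     question_sections[columns[i]] = section
--                 i += 1
--     return question_sections, question_subsections
-- ===== SOURCE B (Python) =====
-- def generate_question_list(columns, section_name, subsection_name):
--     question_sections = {}
--     question_subsections = {}
--     current_section = None
--     current_subsection = None
--     for value in columns:
--         if section_name in value:
--             current_section = value
--             current_subsection = None
--         elif subsection_name in value:
--             current_subsection = value
--         elif current_section is not None:
--             question_sections[value] = current_section
--             if current_subsection is not None:
--                 question_subsections[value] = current_subsection
--     return question_sections, question_subsections
-- ===== Notes on version B (the rewrite author's own statement) =====
-- stated objective: simpler
-- what changed: Replaces A's triply nested re-scanning loops (a forward scan from every section marker, plus another from every subsection marker) with one linear pass keeping the current section/subsection markers as running state.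
import Mathlib
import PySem

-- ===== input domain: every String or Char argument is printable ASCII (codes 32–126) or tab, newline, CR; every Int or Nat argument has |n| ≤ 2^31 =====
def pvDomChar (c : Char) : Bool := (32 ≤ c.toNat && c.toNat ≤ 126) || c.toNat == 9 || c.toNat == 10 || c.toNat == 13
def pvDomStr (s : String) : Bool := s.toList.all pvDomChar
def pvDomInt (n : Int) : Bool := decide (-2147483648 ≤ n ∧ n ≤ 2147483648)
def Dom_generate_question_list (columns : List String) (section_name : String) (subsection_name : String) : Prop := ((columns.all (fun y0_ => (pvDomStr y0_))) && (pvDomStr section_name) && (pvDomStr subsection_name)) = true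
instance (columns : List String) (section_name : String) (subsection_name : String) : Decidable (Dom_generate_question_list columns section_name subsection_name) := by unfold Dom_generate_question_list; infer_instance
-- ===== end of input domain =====

-- B replaces A's triply nested re-scanning loops with one linear pass that keeps the
-- current section/subsection markers as running state (simpler; same results).


-- ===== PORT A =====
-- A's innermost while loop (index y), as structural recursion on columns[i+1:]:
-- stop at the next subsection or section marker, else record the subsection.
def pvA_inner (section_name subsection_name subsection : String) :
    List String → PySem.Dict String String → PySem.Dict String String
  | [], qss => qss
  | c :: rest, qss =>
    if PySem.Str.isIn subsection_name c then qss
    else if PySem.Str.isIn section_name c then qss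
    else pvA_inner section_name subsection_name subsection rest (qss.insert c subsection)

-- A's middle while loop (index i) on columns[index+1:]: stop at the next section
-- marker; at a subsection marker run the inner loop; else record the section.
def pvA_middle (section_name subsection_name sectionv : String) :
    List String → PySem.Dict String String → PySem.Dict String String →
    PySem.Dict String String × PySem.Dict String String
  | [], qs, qss => (qs, qss)
  | c :: rest, qs, qss =>
    if PySem.Str.isIn section_name c then (qs, qss)
    else if PySem.Str.isIn subsection_name c then
      pvA_middle section_name subsection_name sectionv rest qs
        (pvA_inner section_name subsection_name c rest qss)
    else pvA_middle section_name subsection_name sectionv rest (qs.insert c sectionv) qss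

-- A's outer for loop: at every section marker, run the middle loop on the tail.
def pvA_outer (section_name subsection_name : String) :
    List String → PySem.Dict String String → PySem.Dict String String →
    PySem.Dict String String × PySem.Dict String String
  | [], qs, qss => (qs, qss)
  | c :: rest, qs, qss =>
    if PySem.Str.isIn section_name c then
      let st := pvA_middle section_name subsection_name c rest qs qss
      pvA_outer section_name subsection_name rest st.1 st.2
    else pvA_outer section_name subsection_name rest qs qss

def generate_question_list (columns : List String) (section_name : String) (subsection_name : String) : (List (String × String)) × (List (String × String)) :=
  let st := pvA_outer section_name subsection_name columns PySem.Dict.empty PySem.Dict.empty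
  (st.1.items, st.2.items)

-- ===== PORT B =====
-- B's single pass, carrying the current section/subsection markers.
def pvB_loop (section_name subsection_name : String) :
    List String → Option String → Option String →
    PySem.Dict String String → PySem.Dict String String →
    PySem.Dict String String × PySem.Dict String String
  | [], _, _, qs, qss => (qs, qss)
  | v :: rest, csec, csub, qs, qss =>
    if PySem.Str.isIn section_name v then
      pvB_loop section_name subsection_name rest (some v) none qs qss
    else if PySem.Str.isIn subsection_name v then
      pvB_loop section_name subsection_name rest csec (some v) qs qss
    else
      match csec with
      | none => pvB_loop section_name subsection_name rest csec csub qs qss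
      | some s =>
        pvB_loop section_name subsection_name rest csec csub (qs.insert v s)
          (match csub with
           | none => qss
           | some ss => qss.insert v ss)

def generate_question_list_alt (columns : List String) (section_name : String) (subsection_name : String) : (List (String × String)) × (List (String × String)) :=
  let st := pvB_loop section_name subsection_name columns none none PySem.Dict.empty PySem.Dict.empty
  (st.1.items, st.2.items)

-- ===== PRECONDITION & SPEC =====
def Spec_generate_question_list (columns : List String) (section_name : String) (subsection_name : String) (out : (List (String × String)) × (List (String × String))) : Prop := out = generate_question_list_alt columns section_name subsection_name
instance (columns : List String) (section_name : String) (subsection_name : String) (out : (List (String × String)) × (List (String × String))) : Decidable (Spec_generate_question_list columns section_name subsection_name out) := by unfold Spec_generate_question_list; infer_instance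

-- ===== CLAIM (what is proved, stated in full; the proofs are below) =====
def Claim_equal_generate_question_list : Prop := ∀ (columns : List String) (section_name : String) (subsection_name : String), Dom_generate_question_list columns section_name subsection_name → Spec_generate_question_list columns section_name subsection_name (generate_question_list columns section_name subsection_name)

-- ===== LEMMAS AND PROOFS =====

-- The three states of B's pass each correspond to a residue of A's loop nest:
-- csec = none      ↦ A's outer loop scanning for the next section marker;
-- csec = some s    ↦ A's middle loop for section s (composed with the rest of the outer loop);
-- csub = some ss   ↦ additionally A's inner loop for subsection ss (run first on the tail).
theorem pvB_loop_states (sec sub : String) (rest : List String) :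
    ∀ qs qss : PySem.Dict String String,
      (∀ csub, pvB_loop sec sub rest none csub qs qss = pvA_outer sec sub rest qs qss)
      ∧ (∀ s, pvB_loop sec sub rest (some s) none qs qss =
          (pvA_middle sec sub s rest qs qss).rec (fun a b => pvA_outer sec sub rest a b))
      ∧ (∀ s ss, pvB_loop sec sub rest (some s) (some ss) qs qss =
          (pvA_middle sec sub s rest qs (pvA_inner sec sub ss rest qss)).rec
            (fun a b => pvA_outer sec sub rest a b)) := by
  induction rest with
  | nil => intro qs qss; simp [pvB_loop, pvA_outer, pvA_middle, pvA_inner]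
  | cons c r ih =>
    intro qs qss
    by_cases hsec : PySem.Chars.isIn sec.toList c.toList = true
    · refine ⟨fun csub => ?_, fun s => ?_, fun s ss => ?_⟩ <;>
        simp [pvB_loop, pvA_outer, pvA_middle, pvA_inner, PySem.Str.isIn, hsec, (ih qs qss).2.1 c]
    · by_cases hsub : PySem.Chars.isIn sub.toList c.toList = true
      · refine ⟨fun csub => ?_, fun s => ?_, fun s ss => ?_⟩
        · cases csub <;>
            simp [pvB_loop, pvA_outer, PySem.Str.isIn, hsec, hsub, (ih qs qss).1]
        · simp [pvB_loop, pvA_outer, pvA_middle, PySem.Str.isIn, hsec, hsub, (ih qs qss).2.2 s c]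
        · simp [pvB_loop, pvA_outer, pvA_middle, pvA_inner, PySem.Str.isIn, hsec, hsub, (ih qs qss).2.2 s c]
      · refine ⟨fun csub => ?_, fun s => ?_, fun s ss => ?_⟩
        · cases csub <;>
            simp [pvB_loop, pvA_outer, PySem.Str.isIn, hsec, hsub, (ih qs qss).1]
        · simp [pvB_loop, pvA_outer, pvA_middle, PySem.Str.isIn, hsec, hsub,
            (ih (qs.insert c s) qss).2.1 s]
        · simp [pvB_loop, pvA_outer, pvA_middle, pvA_inner, PySem.Str.isIn, hsec, hsub,
            (ih (qs.insert c s) (qss.insert c ss)).2.2 s ss]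

-- ===== VERDICT (by name: the statement is the Claim_ definition above) =====
theorem generate_question_list_spec : Claim_equal_generate_question_list := by
  intro columns sec sub _
  unfold Spec_generate_question_list generate_question_list generate_question_list_alt
  rw [(pvB_loop_states sec sub columns PySem.Dict.empty PySem.Dict.empty).1 none]
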